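-- pv_equiv track=rewrite | github.com/Manuel-Archila/Lab2_Cifrado | utils.py | sixblockbinary
-- ===== SOURCE A (Python) =====
-- def sixblockbinary(binaries):
--     long_block = "".join(binaries)
--     six_block = []
--     for i in range(0, len(long_block), 6):
--         six_block.append(long_block[i:i+6])
--
--     for i in range(len(six_block)):
--         if len(six_block[i]) < 6:
--             six_block[i] = six_block[i] + '0' * (6 - len(six_block[i]))
--     return six_block
-- ===== SOURCE B (Python) =====
-- def sixblockbinary(binaries):
--     blocks = []
--     cur = ""
--     for binary in binaries:
--         for ch in binary:
--             cur += ch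
--             if len(cur) == 6:
--                 blocks.append(cur)
--                 cur = ""
--     if cur:
--         blocks.append(cur.ljust(6, '0'))
--     return blocks
-- ===== Notes on version B (the rewrite author's own statement) =====
-- stated objective: alternative
-- what changed: B never joins or slices: it streams the characters one by one through an accumulator, emitting a block each time six characters have been collected and zero-padding the leftover accumulator at the end, instead of A's join + stride-slice loop + second patch-up loop.
import Mathlib
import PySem

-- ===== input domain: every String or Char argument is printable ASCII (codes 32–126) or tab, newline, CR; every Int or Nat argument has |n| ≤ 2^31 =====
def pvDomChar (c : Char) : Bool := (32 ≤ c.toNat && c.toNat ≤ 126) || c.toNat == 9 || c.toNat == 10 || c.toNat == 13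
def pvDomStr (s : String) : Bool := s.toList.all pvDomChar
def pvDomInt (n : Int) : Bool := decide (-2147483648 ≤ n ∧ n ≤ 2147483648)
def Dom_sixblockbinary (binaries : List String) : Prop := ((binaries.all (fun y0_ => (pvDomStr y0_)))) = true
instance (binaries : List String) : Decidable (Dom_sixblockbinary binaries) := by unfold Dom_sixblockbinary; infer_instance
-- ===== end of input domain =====

-- B streams the characters through a 6-slot accumulator in one pass (emit on full, pad the
-- leftover at the end) instead of A's join + stride-slicing loop + second patch-up loop
-- ('alternative': same cost, different algorithmic organisation).

-- ===== PORT A =====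
-- long_block = "".join(binaries); loop 'for i in range(0, len, 6): append(long_block[i:i+6])';
-- second loop pads each too-short block in place: each index is written once from its own old
-- value, so the in-place index loop is ported as a map over the list.
def sixblockbinary (binaries : List String) : List String :=
  let long_block : List Char := PySem.Chars.join [] (binaries.map String.toList)
  let six_block : List (List Char) :=
    (PySem.List.pyRange 0 (long_block.length : Int) 6).foldl
      (fun acc i => acc ++ [PySem.List.slice long_block (some i) (some (i + 6))]) []
  (six_block.map (fun b =>
    if b.length < 6 then b ++ List.replicate (6 - b.length) '0' else b)).map String.ofList

-- ===== PORT B =====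
-- one character step of B's inner loop: cur += ch; if len(cur) == 6: append, reset
def sbbStep (st : List (List Char) × List Char) (c : Char) : List (List Char) × List Char :=
  let cur := st.2 ++ [c]
  if cur.length = 6 then (st.1 ++ [cur], []) else (st.1, cur)

-- the epilogue: 'if cur: blocks.append(cur.ljust(6, "0"))'
-- (cur.ljust(6,'0') = cur ++ '0' * (6 - len(cur)) — exact, Nat subtraction matches ljust's no-op
-- on strings already of length ≥ 6)
def sbbFin (st : List (List Char) × List Char) : List (List Char) :=
  if st.2 ≠ [] then st.1 ++ [st.2 ++ List.replicate (6 - st.2.length) '0'] else st.1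

def sixblockbinary_alt (binaries : List String) : List String :=
  let st := binaries.foldl (fun st b => b.toList.foldl sbbStep st) ([], [])
  (sbbFin st).map String.ofList

-- ===== PRECONDITION & SPEC =====
def Spec_sixblockbinary (binaries : List String) (out : List String) : Prop := out = sixblockbinary_alt binaries
instance (binaries : List String) (out : List String) : Decidable (Spec_sixblockbinary binaries out) := by unfold Spec_sixblockbinary; infer_instance

-- ===== CLAIM (what is proved, stated in full; the proofs are below) =====
def Claim_equal_sixblockbinary : Prop := ∀ (binaries : List String), Dom_sixblockbinary binaries → Spec_sixblockbinary binaries (sixblockbinary binaries)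

-- ===== LEMMAS AND PROOFS =====

-- reference chunking: consecutive 6-blocks of a list
def chunk6 (l : List Char) : List (List Char) :=
  if l = [] then [] else l.take 6 :: chunk6 (l.drop 6)
termination_by l.length
decreasing_by
  simp only [List.length_drop]
  have : l ≠ [] := by assumption
  have := List.length_pos_iff.mpr this
  omega

-- A's per-block padding, as a function
def padB (b : List Char) : List Char :=
  if b.length < 6 then b ++ List.replicate (6 - b.length) '0' else b

lemma chunk6_cons {l : List Char} (h : l ≠ []) :
    chunk6 l = l.take 6 :: chunk6 (l.drop 6) := by
  rw [chunk6]; simp [h]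

lemma range_chunk (l : List Char) :
    (List.range ((l.length + 5) / 6)).map (fun k => (l.drop (6*k)).take 6) = chunk6 l := by
  induction l using chunk6.induct with
  | case1 => simp [chunk6]
  | case2 l hne ih =>
    have hpos := List.length_pos_iff.mpr hne
    have hc : (l.length + 5) / 6 = ((l.drop 6).length + 5) / 6 + 1 := by
      simp only [List.length_drop]; omega
    rw [hc, List.range_succ_eq_map, List.map_cons, List.map_map, chunk6_cons hne]
    simp only [Nat.mul_zero, List.drop_zero]
    congr 1
    rw [← ih]
    apply List.map_congr_left
    intro k _
    simp only [Function.comp, List.drop_drop, Nat.succ_eq_add_one]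
    ring_nf

-- the slice loop over range(0, len, 6) is exactly chunk6
lemma slice_map_eq_chunk6 (l : List Char) :
    (PySem.List.pyRange 0 (l.length : Int) 6).map
      (fun i => PySem.List.slice l (some i) (some (i + 6))) = chunk6 l := by
  rw [PySem.List.pyRange_of_pos _ _ (by omega : (0:Int) < 6), List.map_map]
  have hm : (if (0:Int) < l.length then (((l.length:Int) - 0 + 6 - 1) / 6).toNat else 0)
      = (l.length + 5) / 6 := by
    split_ifs with h <;> omega
  rw [hm, ← range_chunk]
  apply List.map_congr_left
  intro k hk
  simp only [Function.comp, zero_add]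
  rw [PySem.List.slice_toNat l (by positivity) (by positivity)]
  congr 1; omega

-- "".join = flatten
lemma join_nil_eq_flatten (xs : List (List Char)) : PySem.Chars.join [] xs = xs.flatten := by
  induction xs with
  | nil => simp [PySem.Chars.join_nil]
  | cons a t ih =>
    cases t with
    | nil => simp [PySem.Chars.join_singleton]
    | cons b u => rw [PySem.Chars.join_cons_cons]; simp_all

-- B's streaming pass, started on a partial block cur (|cur| < 6), produces exactly the
-- padded 6-chunks of cur ++ l appended to the blocks already emitted
lemma sbb_stream (l : List Char) (bl : List (List Char)) (cur : List Char)
    (h : cur.length < 6) :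
    sbbFin (l.foldl sbbStep (bl, cur)) = bl ++ (chunk6 (cur ++ l)).map padB := by
  induction l generalizing bl cur with
  | nil =>
    by_cases hc : cur = []
    · subst hc; simp [sbbFin, chunk6]
    · rw [List.append_nil, chunk6_cons hc,
        List.take_of_length_le (by omega), List.drop_of_length_le (by omega)]
      simp [sbbFin, hc, chunk6, padB, h]
  | cons c l' ih =>
    simp only [List.foldl_cons, sbbStep]
    by_cases h6 : (cur ++ [c]).length = 6
    · rw [if_pos h6, ih _ [] (by simp)]
      have hsp : cur ++ c :: l' = (cur ++ [c]) ++ l' := by simp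
      have h6' : cur.length = 5 := by simpa using h6
      have hr : chunk6 ((cur ++ [c]) ++ l') = (cur ++ [c]) :: chunk6 l' := by
        rw [chunk6_cons (by simp : (cur ++ [c]) ++ l' ≠ [])]
        rw [List.take_append_of_le_length (by simp; omega),
          List.take_of_length_le (by simp; omega),
          List.drop_append_of_le_length (by simp; omega),
          List.drop_of_length_le (by simp; omega)]
        simp
      have hpad : padB (cur ++ [c]) = cur ++ [c] := by simp [padB, h6]
      rw [hsp, hr, List.map_cons, hpad]
      simp
    · rw [if_neg h6]
      have hlt : (cur ++ [c]).length < 6 := by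
        simp only [List.length_append, List.length_cons, List.length_nil] at h6 ⊢; omega
      rw [ih _ _ hlt]
      congr 2
      simp

-- ===== VERDICT (by name: the statement is the Claim_ definition above) =====
theorem sixblockbinary_spec : Claim_equal_sixblockbinary := by
  intro binaries _
  unfold Spec_sixblockbinary sixblockbinary sixblockbinary_alt
  simp only [PySem.List.foldl_append_singleton_eq_map, List.nil_append,
    join_nil_eq_flatten]
  rw [slice_map_eq_chunk6]
  have hfold : binaries.foldl (fun st b => b.toList.foldl sbbStep st) ([], []) =
      ((binaries.map String.toList).flatten).foldl sbbStep ([], []) := by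
    rw [List.foldl_flatten, List.foldl_map]
  rw [hfold, sbb_stream _ [] [] (by simp)]
  simp [padB]
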